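-- pv_equiv track=rewrite | github.com/akarande0906/leetcode75 | More_LC/Meta/Practice_tests/reverse_and_make_equal.py | are_they_equal
-- ===== SOURCE A (Python) =====
-- def are_they_equal(array_a, array_b):
--   # Write your code here
--   lptr = 0
--   rptr = len(array_a) - 1
--   while lptr <= rptr:
--     if array_a[lptr] != array_b[lptr] and array_a[rptr] != array_b[rptr]:
--       break
--     if array_a[lptr] == array_b[lptr]:
--       lptr += 1
--     if array_a[rptr] == array_b[rptr]:
--       rptr -= 1
--   while lptr <= rptr:
--     if array_a[lptr] != array_b[rptr]:
--       return False
--     lptr += 1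
--     rptr -= 1
--   return True
-- ===== SOURCE B (Python) =====
-- def are_they_equal(array_a, array_b):
--     n = len(array_a)
--     diffs = [k for k in range(n) if array_a[k] != array_b[k]]
--     if not diffs:
--         return True
--     i = diffs[0]
--     j = diffs[-1]
--     sub_a = array_a[i:j+1]
--     sub_b = array_b[i:j+1]
--     return sub_a == sub_b[::-1]
-- ===== Notes on version B (the rewrite author's own statement) =====
-- stated objective: alternative
-- what changed: A's interleaved two-pointer while-loop (pointer state advanced conditionally, then a second pointer loop checking only the first half of the mirrored pairs) is replaced by: build the complete list of mismatch indices with one comprehension, take its first and last element, and decide by a whole-slice comparison array_a[i:j+1] == array_b[i:j+1][::-1]; B therefore checks the full region, fixing A's half-check bug.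
-- intended difference: On inputs whose mismatch region has its left half mirrored but not its right half (e.g. [1,2] vs [3,1]), A returns True although array_b is not array_a with a subarray reversed, because A's second loop stops at the middle and never compares the right-half pairs; B returns False, which is the intended answer. — e.g. on are_they_equal([1, 2], [3, 1]): A returns true, B returns false
import Mathlib
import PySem

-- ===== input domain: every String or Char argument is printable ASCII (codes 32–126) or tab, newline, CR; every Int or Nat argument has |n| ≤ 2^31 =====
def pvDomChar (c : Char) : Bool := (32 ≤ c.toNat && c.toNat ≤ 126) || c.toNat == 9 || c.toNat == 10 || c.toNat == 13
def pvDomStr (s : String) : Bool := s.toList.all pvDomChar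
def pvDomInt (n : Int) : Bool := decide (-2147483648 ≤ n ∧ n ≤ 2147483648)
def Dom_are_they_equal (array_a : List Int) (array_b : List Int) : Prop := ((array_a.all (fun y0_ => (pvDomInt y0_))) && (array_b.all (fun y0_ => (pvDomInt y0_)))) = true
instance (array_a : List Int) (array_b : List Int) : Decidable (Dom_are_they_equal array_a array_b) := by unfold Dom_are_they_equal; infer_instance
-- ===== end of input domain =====

-- B replaces A's interleaved two-pointer loop by materializing the list of all mismatch
-- indices with one comprehension and deciding by a whole-slice comparison
-- array_a[i:j+1] == array_b[i:j+1][::-1]; objective: alternative decomposition.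
-- B checks the WHOLE mismatch region, fixing A's half-check bug (see D_ below).


-- ===== PORT A =====
-- first while loop of A: advance lptr / retreat rptr until both ends mismatch (or cross).
-- Option equality 'pyGet? _ = pyGet? _' compares the two list reads; under Pre_ every read is
-- in range (some _), exactly Python's comparison.  Out of range Python raises IndexError.
def pvLoop1 (a b : List Int) (l r : Int) : Int × Int :=
  if _h : l ≤ r then
    if _hbr : PySem.List.pyGet? a l ≠ PySem.List.pyGet? b l ∧ PySem.List.pyGet? a r ≠ PySem.List.pyGet? b r then
      (l, r)
    else
      pvLoop1 a b (if PySem.List.pyGet? a l = PySem.List.pyGet? b l then l + 1 else l)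
                  (if PySem.List.pyGet? a r = PySem.List.pyGet? b r then r - 1 else r)
  else (l, r)
termination_by (r - l + 1).toNat
decreasing_by
  simp only [not_and_or, not_not] at _hbr
  rcases _hbr with h | h <;> split_ifs <;> omega

-- second while loop of A: pairwise check from both ends.
def pvLoop2 (a b : List Int) (l r : Int) : Bool :=
  if _h : l ≤ r then
    if PySem.List.pyGet? a l ≠ PySem.List.pyGet? b r then false
    else pvLoop2 a b (l + 1) (r - 1)
  else true
termination_by (r - l + 1).toNat
decreasing_by omega

def are_they_equal (array_a : List Int) (array_b : List Int) : Bool :=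
  let p := pvLoop1 array_a array_b 0 ((array_a.length : Int) - 1)
  pvLoop2 array_a array_b p.1 p.2

-- ===== PORT B =====
-- n = len(array_a); diffs = [k for k in range(n) if array_a[k] != array_b[k]];
-- if not diffs: True; i = diffs[0]; j = diffs[-1]; return array_a[i:j+1] == array_b[i:j+1][::-1].
-- diffs[0]/diffs[-1] are read only when diffs is nonempty, so headD/getLastD are exact there;
-- '[::-1]' is reverse (PySem.List.slice?_none_none_neg_one).
def are_they_equal_alt (array_a : List Int) (array_b : List Int) : Bool :=
  let n : Int := array_a.length
  let diffs := (PySem.List.pyRange 0 n 1).filter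
      (fun k => !(PySem.List.pyGet? array_a k == PySem.List.pyGet? array_b k))
  if diffs.isEmpty then true
  else
    let i := diffs.headD 0
    let j := diffs.getLastD 0
    let sub_a := PySem.List.slice array_a (some i) (some (j + 1))
    let sub_b := PySem.List.slice array_b (some i) (some (j + 1))
    sub_a == sub_b.reverse

-- ===== PRECONDITION & SPEC =====
-- Pre_ excludes exactly the inputs where Python A raises IndexError: A indexes array_b at every
-- index of array_a, so it raises iff len(array_a) > len(array_b) (with array_a nonempty; for
-- empty array_a the bound holds trivially).
def Pre_are_they_equal (array_a : List Int) (array_b : List Int) : Prop :=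
  array_a.length ≤ array_b.length
instance (array_a : List Int) (array_b : List Int) : Decidable (Pre_are_they_equal array_a array_b) := by
  unfold Pre_are_they_equal; infer_instance
def pvWitness_are_they_equal : List Int × List Int := ([1], [1])

-- On inputs whose mismatch region [i..j] has its left half mirrored but not its right half,
-- A returns True (its second loop stops at the middle, checking only half the pairs) while B
-- returns False; B is intended, since b is NOT a with a subarray reversed there (e.g. [1,2] vs [3,1]).
def D_are_they_equal (array_a : List Int) (array_b : List Int) : Prop :=
  let r := ((array_a.zip array_b).dropWhile fun q => q.1 = q.2).rdropWhile fun q => q.1 = q.2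
  let c := (r.zip r.reverse).takeWhile fun q => q.1.1 = q.2.2
  r.length ≤ 2 * c.length ∧ c.length < r.length
instance (array_a : List Int) (array_b : List Int) : Decidable (D_are_they_equal array_a array_b) := by
  unfold D_are_they_equal; infer_instance

def Spec_are_they_equal (array_a : List Int) (array_b : List Int) (out : Bool) : Prop :=
  ¬ D_are_they_equal array_a array_b → out = are_they_equal_alt array_a array_b
instance (array_a : List Int) (array_b : List Int) (out : Bool) : Decidable (Spec_are_they_equal array_a array_b out) := by
  unfold Spec_are_they_equal; infer_instance

def pvDiffWitness_are_they_equal : List Int × List Int := ([1, 2], [3, 1])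
def pvDiffWitnessOut_are_they_equal : Bool × Bool := (true, false)

-- ===== CLAIM (what is proved, stated in full; the proofs are below) =====
def Claim_unchanged_are_they_equal : Prop := ∀ (array_a : List Int) (array_b : List Int), Dom_are_they_equal array_a array_b → Pre_are_they_equal array_a array_b → Spec_are_they_equal array_a array_b (are_they_equal array_a array_b)
def Claim_changed_are_they_equal : Prop := Dom_are_they_equal (pvDiffWitness_are_they_equal.1) (pvDiffWitness_are_they_equal.2) ∧ Pre_are_they_equal (pvDiffWitness_are_they_equal.1) (pvDiffWitness_are_they_equal.2) ∧ D_are_they_equal (pvDiffWitness_are_they_equal.1) (pvDiffWitness_are_they_equal.2) ∧ are_they_equal (pvDiffWitness_are_they_equal.1) (pvDiffWitness_are_they_equal.2) = pvDiffWitnessOut_are_they_equal.1 ∧ are_they_equal_alt (pvDiffWitness_are_they_equal.1) (pvDiffWitness_are_they_equal.2) = pvDiffWitnessOut_are_they_equal.2 ∧ pvDiffWitnessOut_are_they_equal.1 ≠ pvDiffWitnessOut_are_they_equal.2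
def Claim_exact_are_they_equal : Prop := ∀ (array_a : List Int) (array_b : List Int), Dom_are_they_equal array_a array_b → Pre_are_they_equal array_a array_b → D_are_they_equal array_a array_b → are_they_equal array_a array_b ≠ are_they_equal_alt array_a array_b

-- ===== LEMMAS AND PROOFS =====

-- proof-side helpers: the mismatch positions, their first/last element, and the Boolean
-- 'the first cnt mirrored pairs of the region [i..j] agree' (D_ above is their unfolding)
def pvMism (a b : List Int) : List Nat :=
  (List.range a.length).filter fun k => a.getD k 0 != b.getD k 0
def pvFd (a b : List Int) : Nat := (pvMism a b).headD 0
def pvLd (a b : List Int) : Nat := (pvMism a b).getLastD 0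
def pvPairs (a b : List Int) (i j cnt : Nat) : Bool :=
  (List.range cnt).all (fun t => a.getD (i + t) 0 == b.getD (j - t) 0)

lemma pv_pairs_iff (a b : List Int) (i j c : Nat) :
    pvPairs a b i j c = true ↔ ∀ t < c, a.getD (i + t) 0 = b.getD (j - t) 0 := by
  simp [pvPairs, List.all_eq_true, List.mem_range]

lemma pv_mem_mism (a b : List Int) (k : Nat) :
    k ∈ pvMism a b ↔ k < a.length ∧ a.getD k 0 ≠ b.getD k 0 := by
  simp [pvMism, List.mem_filter, List.mem_range, bne_iff_ne]

lemma pv_mism_pairwise (a b : List Int) : (pvMism a b).Pairwise (· < ·) := by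
  exact (List.pairwise_lt_range).filter _

lemma pv_headD_le {l : List Nat} {d x : Nat} (h : l.Pairwise (· < ·)) (hx : x ∈ l) :
    l.headD d ≤ x := by
  cases l with
  | nil => cases hx
  | cons y t =>
    rcases List.mem_cons.mp hx with rfl | hxt
    · simp
    · exact le_of_lt (List.rel_of_pairwise_cons h hxt)

lemma pv_le_getLastD {l : List Nat} {x : Nat} (h : l.Pairwise (· < ·)) (hx : x ∈ l) :
    ∀ d, x ≤ l.getLastD d := by
  induction l generalizing x with
  | nil => cases hx
  | cons y t ih =>
    intro d
    rw [List.getLastD_cons]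
    rcases List.mem_cons.mp hx with rfl | hxt
    · rcases List.mem_cons.mp (List.getLastD_mem_cons (l := t) (a := x)) with hEq | hMem
      · exact hEq.ge
      · exact le_of_lt (List.rel_of_pairwise_cons h hMem)
    · exact ih h.of_cons hxt y

lemma pv_fd_spec (a b : List Int) (hm : pvMism a b ≠ []) :
    pvFd a b ∈ pvMism a b ∧ ∀ k ∈ pvMism a b, pvFd a b ≤ k := by
  constructor
  · unfold pvFd
    cases h : pvMism a b with
    | nil => exact absurd h hm
    | cons y t => simp
  · intro k hk
    exact pv_headD_le (pv_mism_pairwise a b) hk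

lemma pv_ld_spec (a b : List Int) (hm : pvMism a b ≠ []) :
    pvLd a b ∈ pvMism a b ∧ ∀ k ∈ pvMism a b, k ≤ pvLd a b := by
  constructor
  · cases h : pvMism a b with
    | nil => exact absurd h hm
    | cons y t =>
      unfold pvLd
      rw [h, List.getLastD_cons]
      rcases List.mem_cons.mp (List.getLastD_mem_cons (l := t) (a := y)) with hEq | hMem
      · rw [hEq]; exact List.mem_cons_self
      · exact List.mem_cons_of_mem _ hMem
  · intro k hk
    exact pv_le_getLastD (pv_mism_pairwise a b) hk _

lemma pv_getElem_idx {α : Type} (l : List α) {i j : Nat} (h : i = j) (hi : i < l.length) :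
    l[i]'hi = l[j]'(h ▸ hi) := by subst h; rfl

lemma pv_dropWhile_eq_drop {α : Type} (p : α → Bool) (l : List α) :
    l.dropWhile p = l.drop (l.takeWhile p).length := by
  calc l.dropWhile p = ((l.takeWhile p) ++ (l.dropWhile p)).drop (l.takeWhile p).length := by
        rw [List.drop_left]
    _ = l.drop (l.takeWhile p).length := by rw [List.takeWhile_append_dropWhile]

lemma pv_takeWhile_length {α : Type} (p : α → Bool) (l : List α) (i : Nat) (hi : i < l.length)
    (hb : ∀ k (hk : k < i), p (l[k]'(by omega)) = true) (ha : p (l[i]'hi) = false) :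
    (l.takeWhile p).length = i := by
  induction l generalizing i with
  | nil => simp at hi
  | cons x xs ih =>
    cases i with
    | zero => simp only [List.getElem_cons_zero] at ha; simp [List.takeWhile_cons, ha]
    | succ k =>
      have hx : p x = true := by simpa using hb 0 (by omega)
      rw [List.takeWhile_cons, if_pos hx]
      simp only [List.length_cons]
      rw [ih k (by simpa using hi) (fun u hu => by simpa using hb (u + 1) (by omega))
        (by simpa using ha)]

lemma pv_tw_true {α : Type} (p : α → Bool) (l : List α) (u : Nat)
    (hu : u < (l.takeWhile p).length) (hul : u < l.length) : p (l[u]'hul) = true := by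
  induction l generalizing u with
  | nil => simp at hul
  | cons x t ih =>
    rw [List.takeWhile_cons] at hu
    by_cases hx : p x = true
    · rw [if_pos hx] at hu
      cases u with
      | zero => simpa using hx
      | succ v => exact ih v (by simpa using hu) (by simpa using hul)
    · rw [if_neg hx] at hu
      simp at hu

lemma pv_tw_false {α : Type} (p : α → Bool) (l : List α)
    (hf : (l.takeWhile p).length < l.length) :
    p (l[(l.takeWhile p).length]'hf) = false := by
  induction l with
  | nil => simp at hf
  | cons x t ih =>
    by_cases hx : p x = true
    · have he : (x :: t).takeWhile p = x :: t.takeWhile p := by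
        rw [List.takeWhile_cons, if_pos hx]
      have hf' : (t.takeWhile p).length < t.length := by
        have := hf
        rw [he] at this
        simpa using this
      have := ih hf'
      rw [pv_getElem_idx (x :: t) (show (( x :: t).takeWhile p).length = (t.takeWhile p).length + 1 by rw [he]; simp)]
      simpa using this
    · have he : (x :: t).takeWhile p = [] := by
        rw [List.takeWhile_cons, if_neg hx]
      rw [pv_getElem_idx (x :: t) (show ((x :: t).takeWhile p).length = 0 by rw [he]; simp)]
      simpa using hx

lemma pv_D_iff (a b : List Int) (hab : a.length ≤ b.length) :
    D_are_they_equal a b ↔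
      (pvMism a b ≠ [] ∧
        (∀ t < (pvLd a b - pvFd a b) / 2 + 1,
          a.getD (pvFd a b + t) 0 = b.getD (pvLd a b - t) 0) ∧
        ¬ ∀ t < pvLd a b - pvFd a b + 1,
          a.getD (pvFd a b + t) 0 = b.getD (pvLd a b - t) 0) := by
  have hzlen : (a.zip b).length = a.length := by simp [List.length_zip]; omega
  have hz : ∀ k (hk : k < a.length),
      (a.zip b)[k]'(by omega) = (a[k]'hk, b[k]'(by omega)) := by
    intro k hk
    exact List.getElem_zip
  by_cases hm : pvMism a b = []
  · have hall : ∀ k (hk : k < a.length), a[k]'hk = b[k]'(by omega) := by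
      intro k hk
      by_contra hc
      have : k ∈ pvMism a b := (pv_mem_mism a b k).mpr
        ⟨hk, by rwa [List.getD_eq_getElem _ _ hk, List.getD_eq_getElem _ _ (by omega)]⟩
      simp [hm] at this
    have hnil : (a.zip b).dropWhile (fun q => decide (q.1 = q.2)) = [] := by
      rw [List.dropWhile_eq_nil_iff]
      intro x hx
      obtain ⟨k, hk, hkx⟩ := List.mem_iff_getElem.mp hx
      rw [← hkx, hz k (by omega)]
      simpa using hall k (by omega)
    unfold D_are_they_equal
    rw [hnil]
    simp [hm, List.rdropWhile]
  · obtain ⟨hfdmem, hfdmin⟩ := pv_fd_spec a b hm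
    obtain ⟨hldmem, hldmax⟩ := pv_ld_spec a b hm
    obtain ⟨hfdlt, hfdne⟩ := (pv_mem_mism a b _).mp hfdmem
    obtain ⟨hldlt, hldne⟩ := (pv_mem_mism a b _).mp hldmem
    have hfdld : pvFd a b ≤ pvLd a b := hldmax _ hfdmem
    set n := a.length with hn
    set fd := pvFd a b with hfd
    set ld := pvLd a b with hld
    set w := ld + 1 - fd with hw
    have hmatch : ∀ k (hk : k < n), k ≠ fd → (k < fd ∨ ld < k) →
        (decide ((((a.zip b)[k]'(by omega)).1 : Int) = ((a.zip b)[k]'(by omega)).2)) = true := by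
      intro k hk _ hout
      have hnotm : k ∉ pvMism a b := by
        intro hmem
        rcases hout with h | h
        · exact absurd (hfdmin k hmem) (by omega)
        · exact absurd (hldmax k hmem) (by omega)
      have : a.getD k 0 = b.getD k 0 := by
        by_contra hc
        exact hnotm ((pv_mem_mism a b k).mpr ⟨hk, hc⟩)
      rw [hz k hk]
      rw [List.getD_eq_getElem _ _ hk, List.getD_eq_getElem _ _ (by omega)] at this
      simpa using this
    have hmis : ∀ k (hk : k < n), k = fd ∨ k = ld →
        (decide ((((a.zip b)[k]'(by omega)).1 : Int) = ((a.zip b)[k]'(by omega)).2)) = false := by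
      intro k hk hkeq
      have : a.getD k 0 ≠ b.getD k 0 := by rcases hkeq with rfl | rfl <;> assumption
      rw [List.getD_eq_getElem _ _ hk, List.getD_eq_getElem _ _ (by omega)] at this
      rw [hz k hk]
      simpa using this
    have step1 : (((a.zip b)).takeWhile (fun q => decide (q.1 = q.2))).length = fd := by
      refine pv_takeWhile_length _ _ fd (by omega) ?_ ?_
      · intro k hk
        exact hmatch k (by omega) (by omega) (by omega)
      · exact hmis fd (by omega) (Or.inl rfl)
    have step1' : (a.zip b).dropWhile (fun q => decide (q.1 = q.2)) = (a.zip b).drop fd := by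
      rw [pv_dropWhile_eq_drop, step1]
    have hclen : ((a.zip b).drop fd).length = n - fd := by simp [hzlen]
    have hrev : ∀ u (hu : u < n - fd),
        (((a.zip b).drop fd).reverse)[u]'(by simp [hclen]; omega) = (a.zip b)[n - 1 - u]'(by omega) := by
      intro u hu
      rw [List.getElem_reverse, List.getElem_drop]
      congr 1
      simp [hclen]
      omega
    have step2 : ((((a.zip b).drop fd).reverse).takeWhile (fun q => decide (q.1 = q.2))).length
        = n - 1 - ld := by
      refine pv_takeWhile_length _ _ (n - 1 - ld) (by simp [hclen]; omega) ?_ ?_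
      · intro k hk
        rw [hrev k (by omega)]
        exact hmatch (n - 1 - k) (by omega) (by omega) (by omega)
      · rw [hrev (n - 1 - ld) (by omega)]
        exact hmis (n - 1 - (n - 1 - ld)) (by omega) (Or.inr (by omega))
    have hr : ((a.zip b).dropWhile fun q => decide (q.1 = q.2)).rdropWhile
          (fun q => decide (q.1 = q.2)) = ((a.zip b).drop fd).take w := by
      rw [List.rdropWhile, step1', pv_dropWhile_eq_drop, step2, List.drop_reverse,
        List.reverse_reverse]
      congr 1
      simp [hclen]
      omega
    have hrlen : (((a.zip b).drop fd).take w).length = w := by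
      simp [hclen]
      omega
    have hrget : ∀ u (hu : u < w),
        ((((a.zip b).drop fd).take w)[u]'(by omega)) = (a.zip b)[fd + u]'(by omega) := by
      intro u hu
      simp [List.getElem_take, List.getElem_drop]
    have hqlen : ((((a.zip b).drop fd).take w).zip (((a.zip b).drop fd).take w).reverse).length
        = w := by
      simp [hrlen]
    have hpred : ∀ u (hu : u < w),
        decide ((((((a.zip b).drop fd).take w).zip
            (((a.zip b).drop fd).take w).reverse)[u]'(by omega)).1.1
          = (((((a.zip b).drop fd).take w).zip
            (((a.zip b).drop fd).take w).reverse)[u]'(by omega)).2.2)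
          = decide (a.getD (fd + u) 0 = b.getD (ld - u) 0) := by
      intro u hu
      rw [List.getElem_zip, List.getElem_reverse]
      rw [hrget u (by omega),
        pv_getElem_idx (((a.zip b).drop fd).take w)
          (show (((a.zip b).drop fd).take w).length - 1 - u = w - 1 - u by omega),
        hrget (w - 1 - u) (by omega)]
      rw [hz (fd + u) (by omega), pv_getElem_idx (a.zip b)
        (show fd + (w - 1 - u) = ld - u by omega), hz (ld - u) (by omega)]
      simp only []
      rw [List.getD_eq_getElem _ _ (show fd + u < a.length by omega),
        List.getD_eq_getElem _ _ (show ld - u < b.length by omega)]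
    unfold D_are_they_equal
    simp only [hr]
    set f := (((((a.zip b).drop fd).take w).zip
        (((a.zip b).drop fd).take w).reverse).takeWhile
        fun q => decide (q.1.1 = q.2.2)).length with hfdef
    have hfw : f ≤ w :=
      le_trans (List.IsPrefix.length_le (List.takeWhile_prefix _)) (le_of_eq hqlen)
    have htrue : ∀ u, u < f → a.getD (fd + u) 0 = b.getD (ld - u) 0 := by
      intro u huf
      have := pv_tw_true (fun (q : (Int × Int) × Int × Int) => decide (q.1.1 = q.2.2)) _ u
        (by rw [← hfdef]; omega) (by omega)
      simp only [] at this
      rw [hpred u (by omega)] at this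
      simpa using this
    have hfalse : f < w → ¬ a.getD (fd + f) 0 = b.getD (ld - f) 0 := by
      intro hltw
      have := pv_tw_false (fun (q : (Int × Int) × Int × Int) => decide (q.1.1 = q.2.2))
        ((((a.zip b).drop fd).take w).zip (((a.zip b).drop fd).take w).reverse)
        (by rw [← hfdef]; omega)
      simp only [] at this
      rw [pv_getElem_idx _ (hfdef.symm)] at this
      rw [hpred f (by omega)] at this
      simpa using this
    rw [hrlen]
    constructor
    · rintro ⟨h1, h2⟩
      refine ⟨hm, ?_, ?_⟩
      · intro t ht
        exact htrue t (by omega)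
      · intro hall
        exact hfalse (by omega) (hall f (by omega))
    · rintro ⟨_, hhalf, hnfull⟩
      have h1 : (ld - fd) / 2 + 1 ≤ f := by
        by_contra hc
        exact hfalse (by omega) (hhalf f (by omega))
      have h2 : f < w := by
        rcases Nat.lt_or_ge f w with h | h
        · exact h
        · exact absurd (fun t ht => htrue t (by omega)) hnfull
      exact ⟨by omega, by omega⟩

lemma pv_pyGet_getD (xs : List Int) (i : Int) (h0 : 0 ≤ i) (h1 : i < (xs.length : Int)) :
    PySem.List.pyGet? xs i = some (xs.getD i.toNat 0) := by
  have hlt : i.toNat < xs.length := by omega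
  rw [show i = ((i.toNat : Nat) : Int) by omega, PySem.List.pyGet?_natCast,
    List.getElem?_eq_getElem hlt]
  simp only [Int.toNat_natCast]
  rw [List.getD_eq_getElem _ _ hlt]

lemma pv_all_congr {α : Type} (l : List α) (p q : α → Bool) (h : ∀ x ∈ l, p x = q x) :
    l.all p = l.all q := by
  induction l with
  | nil => rfl
  | cons x t ih =>
    simp only [List.all_cons, h x (List.mem_cons_self ..),
      ih (fun y hy => h y (List.mem_cons_of_mem _ hy))]

-- pvPairs peels one pair off the front of the region
lemma pv_pairs_cons (a b : List Int) (i j c : Nat) :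
    pvPairs a b i j (c + 1) = ((a.getD i 0 == b.getD j 0) && pvPairs a b (i + 1) (j - 1) c) := by
  unfold pvPairs
  rw [List.range_succ_eq_map]
  simp only [List.all_cons, List.all_map, Nat.add_zero, Nat.sub_zero]
  congr 1
  apply pv_all_congr
  intro t _
  simp only [Function.comp_apply]
  rw [show i + (t + 1) = i + 1 + t by omega, show j - (t + 1) = j - 1 - t by omega]

lemma pv_pairs_mono (a b : List Int) (i j : Nat) {c1 c2 : Nat} (h : c1 ≤ c2)
    (h2 : pvPairs a b i j c2 = true) : pvPairs a b i j c1 = true := by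
  unfold pvPairs at *
  rw [List.all_eq_true] at *
  intro t ht
  exact h2 t (List.mem_range.mpr (lt_of_lt_of_le (List.mem_range.mp ht) h))

-- A's combined result is True when the arrays agree everywhere
lemma pv_loopA_all_eq (a b : List Int) (hab : a.length ≤ b.length)
    (hall : ∀ k : Nat, k < a.length → a.getD k 0 = b.getD k 0) :
    ∀ (m : Nat) (l r : Int), (r - l + 1).toNat ≤ m → 0 ≤ l → r < (a.length : Int) →
      pvLoop2 a b (pvLoop1 a b l r).1 (pvLoop1 a b l r).2 = true := by
  intro m
  induction m with
  | zero =>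
    intro l r hm h0 hr
    have hnl : ¬ (l ≤ r) := by omega
    rw [pvLoop1, dif_neg hnl]
    rw [pvLoop2]
    simp [hnl]
  | succ m ih =>
    intro l r hm h0 hr
    by_cases hlr : l ≤ r
    · have hln : l < (a.length : Int) := by omega
      have h0r : 0 ≤ r := by omega
      have hbl : l < (b.length : Int) := by omega
      have hbr : r < (b.length : Int) := by omega
      have hAl := pv_pyGet_getD a l h0 hln
      have hBl := pv_pyGet_getD b l h0 hbl
      have hAr := pv_pyGet_getD a r h0r hr
      have hBr := pv_pyGet_getD b r h0r hbr
      have heql : a.getD l.toNat 0 = b.getD l.toNat 0 := hall l.toNat (by omega)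
      have heqr : a.getD r.toNat 0 = b.getD r.toNat 0 := hall r.toNat (by omega)
      rw [pvLoop1, dif_pos hlr, hAl, hBl, hAr, hBr,
        dif_neg (by rw [heql]; simp), if_pos (by rw [heql]), if_pos (by rw [heqr])]
      exact ih (l + 1) (r - 1) (by omega) (by omega) (by omega)
    · rw [pvLoop1, dif_neg hlr]
      rw [pvLoop2]
      simp [hlr]

-- A's first loop lands exactly on (first mismatch, last mismatch)
lemma pv_loop1_char (a b : List Int) (hab : a.length ≤ b.length) (hm : pvMism a b ≠ []) :
    ∀ (m : Nat) (l r : Int), (r - l + 1).toNat ≤ m → 0 ≤ l → r < (a.length : Int) →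
      (∀ k : Nat, k < a.length → (k : Int) < l → a.getD k 0 = b.getD k 0) →
      (∀ k : Nat, k < a.length → r < (k : Int) → a.getD k 0 = b.getD k 0) →
      pvLoop1 a b l r = ((pvFd a b : Int), (pvLd a b : Int)) := by
  obtain ⟨hfdmem, hfdmin⟩ := pv_fd_spec a b hm
  obtain ⟨hldmem, hldmax⟩ := pv_ld_spec a b hm
  obtain ⟨hfdlt, hfdne⟩ := (pv_mem_mism a b _).mp hfdmem
  obtain ⟨hldlt, hldne⟩ := (pv_mem_mism a b _).mp hldmem
  have hfdld : pvFd a b ≤ pvLd a b := hldmax _ hfdmem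
  intro m
  induction m with
  | zero =>
    intro l r hmm h0 hr hl hrr
    exfalso
    have hlfd : l ≤ (pvFd a b : Int) := by
      by_contra hc
      exact hfdne (hl _ hfdlt (by omega))
    have hldr : (pvLd a b : Int) ≤ r := by
      by_contra hc
      exact hldne (hrr _ hldlt (by omega))
    omega
  | succ m ih =>
    intro l r hmm h0 hr hl hrr
    have hlfd : l ≤ (pvFd a b : Int) := by
      by_contra hc
      exact hfdne (hl _ hfdlt (by omega))
    have hldr : (pvLd a b : Int) ≤ r := by
      by_contra hc
      exact hldne (hrr _ hldlt (by omega))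
    have hlr : l ≤ r := by omega
    have hln : l < (a.length : Int) := by omega
    have h0r : 0 ≤ r := by omega
    have hAl := pv_pyGet_getD a l h0 hln
    have hBl := pv_pyGet_getD b l h0 (by omega)
    have hAr := pv_pyGet_getD a r h0r hr
    have hBr := pv_pyGet_getD b r h0r (by omega)
    rw [pvLoop1, dif_pos hlr, hAl, hBl, hAr, hBr]
    by_cases hL : a.getD l.toNat 0 = b.getD l.toNat 0
    · rw [dif_neg (by rw [hL]; simp), if_pos (by rw [hL])]
      by_cases hR : a.getD r.toNat 0 = b.getD r.toNat 0
      · rw [if_pos (by rw [hR])]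
        refine ih (l + 1) (r - 1) (by omega) (by omega) (by omega) ?_ ?_
        · intro k hk hkl
          rcases (by omega : (k : Int) < l ∨ (k : Int) = l) with h | h
          · exact hl k hk h
          · rwa [show k = l.toNat by omega]
        · intro k hk hkr
          rcases (by omega : r < (k : Int) ∨ (k : Int) = r) with h | h
          · exact hrr k hk h
          · rwa [show k = r.toNat by omega]
      · rw [if_neg (by simpa using hR)]
        refine ih (l + 1) r (by omega) (by omega) hr ?_ hrr
        intro k hk hkl
        rcases (by omega : (k : Int) < l ∨ (k : Int) = l) with h | h
        · exact hl k hk h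
        · rwa [show k = l.toNat by omega]
    · by_cases hR : a.getD r.toNat 0 = b.getD r.toNat 0
      · rw [dif_neg (by rw [hR]; simp), if_neg (by simpa using hL), if_pos (by rw [hR])]
        refine ih l (r - 1) (by omega) h0 (by omega) hl ?_
        intro k hk hkr
        rcases (by omega : r < (k : Int) ∨ (k : Int) = r) with h | h
        · exact hrr k hk h
        · rwa [show k = r.toNat by omega]
      · rw [dif_pos ⟨by simpa using hL, by simpa using hR⟩]
        have h1 : pvFd a b ≤ l.toNat := hfdmin _ ((pv_mem_mism a b _).mpr ⟨by omega, hL⟩)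
        have h2 : r.toNat ≤ pvLd a b := hldmax _ ((pv_mem_mism a b _).mpr ⟨by omega, hR⟩)
        have e1 : l = (pvFd a b : Int) := by omega
        have e2 : r = (pvLd a b : Int) := by omega
        rw [e1, e2]

-- A's second loop checks exactly the first half of the mirrored pairs
lemma pv_loop2_char (a b : List Int) (hab : a.length ≤ b.length) :
    ∀ (m : Nat) (i j : Nat), j - i ≤ m → i ≤ j → j < a.length →
      pvLoop2 a b (i : Int) (j : Int) = pvPairs a b i j ((j - i) / 2 + 1) := by
  intro m
  induction m with
  | zero =>
    intro i j hm hij hj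
    have hji : j = i := by omega
    subst hji
    have hA := pv_pyGet_getD a (j : Int) (by omega) (by exact_mod_cast hj)
    have hB := pv_pyGet_getD b (j : Int) (by omega) (by push_cast; omega)
    rw [pvLoop2, dif_pos le_rfl, hA, hB]
    simp only [Int.toNat_natCast, Nat.sub_self]
    rw [pv_pairs_cons]
    by_cases h : a.getD j 0 = b.getD j 0
    · rw [if_neg (by rw [h]; simp), pvLoop2, dif_neg (by omega),
        show (a.getD j 0 == b.getD j 0) = true by simpa using h]
      simp [pvPairs]
    · rw [if_pos (by simpa using h),
        show (a.getD j 0 == b.getD j 0) = false from beq_eq_false_iff_ne.mpr h]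
      simp
  | succ m ih =>
    intro i j hm hij hj
    have hA := pv_pyGet_getD a (i : Int) (by omega) (by push_cast; omega)
    have hB := pv_pyGet_getD b (j : Int) (by omega) (by push_cast; omega)
    rw [pvLoop2, dif_pos (by exact_mod_cast hij), hA, hB]
    simp only [Int.toNat_natCast]
    rw [pv_pairs_cons]
    by_cases h : a.getD i 0 = b.getD j 0
    · rw [if_neg (by rw [h]; simp)]
      have hbeq : (a.getD i 0 == b.getD j 0) = true := by simpa using h
      rw [hbeq, Bool.true_and]
      by_cases hcross : j ≤ i + 1
      · rw [pvLoop2, dif_neg (by omega)]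
        have hz : (j - i) / 2 = 0 := by omega
        rw [hz]
        simp [pvPairs]
      · have e1 : (i : Int) + 1 = ((i + 1 : Nat) : Int) := by push_cast; omega
        have e2 : (j : Int) - 1 = ((j - 1 : Nat) : Int) := by push_cast; omega
        rw [e1, e2, ih (i + 1) (j - 1) (by omega) (by omega) (by omega),
          show (j - 1 - (i + 1)) / 2 + 1 = (j - i) / 2 by omega]
    · rw [if_pos (by simpa using h),
        show (a.getD i 0 == b.getD j 0) = false from beq_eq_false_iff_ne.mpr h]
      simp

lemma pv_A_char (a b : List Int) (hab : a.length ≤ b.length) :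
    are_they_equal a b =
      (if pvMism a b = [] then true
       else pvPairs a b (pvFd a b) (pvLd a b) ((pvLd a b - pvFd a b) / 2 + 1)) := by
  show pvLoop2 a b (pvLoop1 a b 0 ((a.length : Int) - 1)).1
      (pvLoop1 a b 0 ((a.length : Int) - 1)).2 = _
  by_cases hm : pvMism a b = []
  · rw [if_pos hm]
    have hall : ∀ k : Nat, k < a.length → a.getD k 0 = b.getD k 0 := by
      intro k hk
      by_contra hc
      have : k ∈ pvMism a b := (pv_mem_mism a b k).mpr ⟨hk, hc⟩
      simp [hm] at this
    exact pv_loopA_all_eq a b hab hall ((a.length : Int) - 1 - 0 + 1).toNat 0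
      ((a.length : Int) - 1) le_rfl (by omega) (by omega)
  · rw [if_neg hm]
    obtain ⟨hfdmem, _⟩ := pv_fd_spec a b hm
    obtain ⟨hldmem, hldmax⟩ := pv_ld_spec a b hm
    obtain ⟨hldlt, _⟩ := (pv_mem_mism a b _).mp hldmem
    have hfdld : pvFd a b ≤ pvLd a b := hldmax _ hfdmem
    rw [pv_loop1_char a b hab hm ((a.length : Int) - 1 - 0 + 1).toNat 0
      ((a.length : Int) - 1) le_rfl (by omega) (by omega)
      (fun k _ hlt => absurd hlt (by omega))
      (fun k hk hgt => absurd hgt (by push_cast; omega))]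
    exact pv_loop2_char a b hab (pvLd a b - pvFd a b) (pvFd a b) (pvLd a b)
      le_rfl hfdld hldlt

-- B-side helpers: headD/getLastD commute with the Nat→Int map
lemma pv_headD_map (l : List Nat) (hl : l ≠ []) :
    (l.map (fun (k : Nat) => (k : Int))).headD 0 = ((l.headD 0 : Nat) : Int) := by
  cases l with
  | nil => exact absurd rfl hl
  | cons x t => simp

lemma pv_getLastD_map (l : List Nat) (d : Int) (d' : Nat) (hd : d = (d' : Int)) :
    (l.map (fun (k : Nat) => (k : Int))).getLastD d = ((l.getLastD d' : Nat) : Int) := by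
  induction l generalizing d d' with
  | nil => simpa using hd
  | cons x t ih =>
    rw [List.map_cons, List.getLastD_cons, List.getLastD_cons]
    exact ih _ _ rfl

-- B's mismatch-index comprehension is exactly pvMism, cast to Int
lemma pv_diffs_eq (a b : List Int) (hab : a.length ≤ b.length) :
    (PySem.List.pyRange 0 (a.length : Int) 1).filter
        (fun k => !(PySem.List.pyGet? a k == PySem.List.pyGet? b k))
      = (pvMism a b).map (fun (k : Nat) => (k : Int)) := by
  rw [PySem.List.pyRange_one]
  simp only [Int.sub_zero, Int.toNat_natCast, zero_add]
  have hfc : (List.range a.length).filter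
      ((fun k => !(PySem.List.pyGet? a k == PySem.List.pyGet? b k)) ∘ (fun (k : Nat) => (k : Int)))
      = pvMism a b := by
    unfold pvMism
    apply List.filter_congr
    intro k hk
    have hklen : k < a.length := List.mem_range.mp hk
    simp only [Function.comp_apply]
    rw [pv_pyGet_getD a (k : Int) (by omega) (by exact_mod_cast hklen),
      pv_pyGet_getD b (k : Int) (by omega) (by push_cast; omega)]
    simp [bne, Int.toNat_natCast]
  rw [List.filter_map, hfc]

-- B's slice-vs-reversed-slice test is exactly the full mirrored-pair check
lemma pv_slice_rev_eq_pairs (a b : List Int) (hab : a.length ≤ b.length)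
    (fd ld : Nat) (hfl : fd ≤ ld) (hld : ld < a.length) :
    (((a.drop fd).take (ld + 1 - fd)) == ((b.drop fd).take (ld + 1 - fd)).reverse)
      = pvPairs a b fd ld (ld - fd + 1) := by
  set w := ld + 1 - fd with hw
  have hlenA : ((a.drop fd).take w).length = w := by simp; omega
  have hlenB : (((b.drop fd).take w).reverse).length = w := by simp; omega
  have hiff : ((a.drop fd).take w) = ((b.drop fd).take w).reverse ↔
      ∀ t < ld - fd + 1, a.getD (fd + t) 0 = b.getD (ld - t) 0 := by
    constructor
    · intro h t ht
      have hteq := List.getElem_of_eq h (show t < ((a.drop fd).take w).length by omega)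
      rw [List.getElem_take, List.getElem_drop] at hteq
      rw [List.getElem_reverse, List.getElem_take, List.getElem_drop] at hteq
      rw [List.getD_eq_getElem _ _ (show fd + t < a.length by omega),
        List.getD_eq_getElem _ _ (show ld - t < b.length by omega)]
      rw [hteq]
      apply pv_getElem_idx
      simp [hlenA]
      omega
    · intro h
      refine List.ext_getElem (by rw [hlenA, hlenB]) ?_
      intro t h1 h2
      have htw : t < w := by omega
      rw [List.getElem_take, List.getElem_drop, List.getElem_reverse, List.getElem_take,
        List.getElem_drop]
      have := h t (by omega)
      rw [List.getD_eq_getElem _ _ (show fd + t < a.length by omega),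
        List.getD_eq_getElem _ _ (show ld - t < b.length by omega)] at this
      rw [this]
      apply pv_getElem_idx
      simp
      omega
  by_cases hp : pvPairs a b fd ld (ld - fd + 1) = true
  · rw [hp, beq_iff_eq]
    exact hiff.mpr ((pv_pairs_iff a b fd ld _).mp hp)
  · rw [Bool.eq_false_iff.mpr hp, beq_eq_false_iff_ne]
    intro heq
    exact hp ((pv_pairs_iff a b fd ld _).mpr (hiff.mp heq))

lemma pv_B_char (a b : List Int) (hab : a.length ≤ b.length) :
    are_they_equal_alt a b =
      (if pvMism a b = [] then true
       else pvPairs a b (pvFd a b) (pvLd a b) (pvLd a b - pvFd a b + 1)) := by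
  unfold are_they_equal_alt
  simp only [pv_diffs_eq a b hab, List.isEmpty_map]
  by_cases hm : pvMism a b = []
  · rw [if_pos hm]
    simp [hm]
  · rw [if_neg hm, if_neg (by simp only [List.isEmpty_iff]; exact hm)]
    obtain ⟨hfdmem, _⟩ := pv_fd_spec a b hm
    obtain ⟨hldmem, hldmax⟩ := pv_ld_spec a b hm
    obtain ⟨_, _⟩ := (pv_mem_mism a b _).mp hfdmem
    obtain ⟨hldlt, _⟩ := (pv_mem_mism a b _).mp hldmem
    have hfdld : pvFd a b ≤ pvLd a b := hldmax _ hfdmem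
    rw [pv_headD_map _ hm, pv_getLastD_map _ 0 0 rfl]
    show (PySem.List.slice a (some ((pvFd a b : Nat) : Int)) (some (((pvLd a b : Nat) : Int) + 1))
        == (PySem.List.slice b (some ((pvFd a b : Nat) : Int))
            (some (((pvLd a b : Nat) : Int) + 1))).reverse) = _
    rw [show ((pvLd a b : Nat) : Int) + 1 = ((pvLd a b + 1 : Nat) : Int) by push_cast; ring]
    rw [PySem.List.slice_natCast, PySem.List.slice_natCast]
    exact pv_slice_rev_eq_pairs a b hab (pvFd a b) (pvLd a b) hfdld hldlt

-- ===== VERDICT (by name: the statement is the Claim_ definition above) =====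
theorem are_they_equal_spec : Claim_unchanged_are_they_equal := by
  intro a b _hdom hpre hnd
  show are_they_equal a b = are_they_equal_alt a b
  rw [pv_A_char a b hpre, pv_B_char a b hpre]
  by_cases hm : pvMism a b = []
  · rw [if_pos hm, if_pos hm]
  · rw [if_neg hm, if_neg hm]
    rw [pv_D_iff a b hpre] at hnd
    by_cases hfull : pvPairs a b (pvFd a b) (pvLd a b) (pvLd a b - pvFd a b + 1) = true
    · rw [hfull]
      exact pv_pairs_mono a b _ _ (by omega) hfull
    · have hf := Bool.eq_false_iff.mpr hfull
      cases hhalf : pvPairs a b (pvFd a b) (pvLd a b) ((pvLd a b - pvFd a b) / 2 + 1) with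
      | false => rw [hf]
      | true =>
        exact absurd ⟨hm, (pv_pairs_iff a b _ _ _).mp hhalf,
          fun hfa => hfull ((pv_pairs_iff a b _ _ _).mpr hfa)⟩ hnd

theorem are_they_equal_changed : Claim_changed_are_they_equal := by
  unfold Claim_changed_are_they_equal
  refine ⟨by decide, by decide, by decide, ?_, ?_, by decide⟩
  · show are_they_equal [1, 2] [3, 1] = true
    simp [are_they_equal, pvLoop1, pvLoop2, PySem.List.pyGet?, PySem.List.pyIdx?]
  · show are_they_equal_alt [1, 2] [3, 1] = false
    decide

theorem are_they_equal_tight : Claim_exact_are_they_equal := by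
  intro a b _hdom hpre hd
  obtain ⟨hm, hhalfP, hfullP⟩ := (pv_D_iff a b hpre).mp hd
  have hhalf := (pv_pairs_iff a b (pvFd a b) (pvLd a b) _).mpr hhalfP
  have hfull : pvPairs a b (pvFd a b) (pvLd a b) (pvLd a b - pvFd a b + 1) = false :=
    Bool.eq_false_iff.mpr fun ht => hfullP ((pv_pairs_iff a b _ _ _).mp ht)
  rw [pv_A_char a b hpre, pv_B_char a b hpre, if_neg hm, if_neg hm, hhalf, hfull]
  simp
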